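-- pv_equiv track=rewrite | github.com/ibraheemmryyian/ISM-bolt | backend/materials_bert_service_simple.py | _generate_performance_metrics
-- ===== SOURCE A (Python) =====
-- def _generate_performance_metrics(material_name, description):
--     """Generate performance metrics based on material characteristics"""
--     text = f"{material_name} {description}".lower()
--
--     metrics = {
--         'strength_rating': 50,
--         'durability_rating': 50,
--         'cost_efficiency': 50,
--         'environmental_impact': 50,
--         'processing_ease': 50
--     }
--
--     # Adjust based on keywords
--     if any(word in text for word in ['strong', 'tensile', 'compressive']):
--         metrics['strength_rating'] += 20
--     if any(word in text for word in ['durable', 'corrosion', 'weather']):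
--         metrics['durability_rating'] += 20
--     if any(word in text for word in ['cheap', 'inexpensive', 'cost-effective']):
--         metrics['cost_efficiency'] += 20
--     if any(word in text for word in ['eco-friendly', 'sustainable', 'green']):
--         metrics['environmental_impact'] += 20
--     if any(word in text for word in ['easy', 'simple', 'machinable']):
--         metrics['processing_ease'] += 20
--
--     # Normalize to 0-100
--     for key in metrics:
--         metrics[key] = max(0, min(100, metrics[key]))
--
--     return metrics
-- ===== SOURCE B (Python) =====
-- # One sweep over the text positions with a flat keyword->metric table
-- # (multi-pattern scan collecting a hit set), instead of per-metric substring searches.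
-- _KEYWORD_KEYS = [
--     ('strong', 'strength_rating'), ('tensile', 'strength_rating'), ('compressive', 'strength_rating'),
--     ('durable', 'durability_rating'), ('corrosion', 'durability_rating'), ('weather', 'durability_rating'),
--     ('cheap', 'cost_efficiency'), ('inexpensive', 'cost_efficiency'), ('cost-effective', 'cost_efficiency'),
--     ('eco-friendly', 'environmental_impact'), ('sustainable', 'environmental_impact'), ('green', 'environmental_impact'),
--     ('easy', 'processing_ease'), ('simple', 'processing_ease'), ('machinable', 'processing_ease'),
-- ]
-- _METRIC_KEYS = ['strength_rating', 'durability_rating', 'cost_efficiency',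
--                 'environmental_impact', 'processing_ease']
--
-- def _scan_hits(text):
--     """Single left-to-right sweep: at each position try every keyword; collect the hit metrics."""
--     hits = set()
--     for i in range(len(text)):
--         for kw, key in _KEYWORD_KEYS:
--             if text.startswith(kw, i):
--                 hits.add(key)
--     return hits
--
-- def _generate_performance_metrics(material_name, description):
--     """Generate performance metrics based on material characteristics"""
--     text = f"{material_name} {description}".lower()
--     hits = _scan_hits(text)
--     return {key: (70 if key in hits else 50) for key in _METRIC_KEYS}
-- ===== Notes on version B (the rewrite author's own statement) =====
-- stated objective: alternative
-- what changed: Replaces A's five hardcoded branches, each doing its own 'keyword in text' substring searches, by a single left-to-right sweep over the text positions matching a flat keyword-to-metric table (a multi-pattern scan collecting a hit set), then building the dict from the hit set; the clamp loop is dropped as a no-op.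
import Mathlib
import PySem

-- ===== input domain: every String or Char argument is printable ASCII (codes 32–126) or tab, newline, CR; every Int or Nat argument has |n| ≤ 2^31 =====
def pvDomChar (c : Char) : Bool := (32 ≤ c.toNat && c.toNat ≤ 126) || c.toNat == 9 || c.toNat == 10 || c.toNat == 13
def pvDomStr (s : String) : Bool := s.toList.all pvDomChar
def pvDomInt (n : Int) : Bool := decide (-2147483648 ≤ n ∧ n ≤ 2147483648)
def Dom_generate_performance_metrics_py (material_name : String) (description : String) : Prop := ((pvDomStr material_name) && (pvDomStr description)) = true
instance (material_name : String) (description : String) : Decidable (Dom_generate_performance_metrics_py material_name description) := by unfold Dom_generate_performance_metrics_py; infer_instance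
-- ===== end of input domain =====

-- B replaces A's five per-metric 'any(keyword in text)' branches (and the no-op clamp loop)
-- by one left-to-right sweep over the text positions matching a flat keyword→metric table
-- into a hit set, then builds the dict from that set (alternative algorithm, similar cost).

-- ===== PORT A =====
-- literal transliteration: build the dict of 50s, five keyword conditionals each adding 20,
-- then the normalisation loop 'for key in metrics: metrics[key] = max(0, min(100, metrics[key]))'
def generate_performance_metrics_py (material_name : String) (description : String) : List (String × Int) :=
  let text := PySem.Chars.lower (material_name.toList ++ ' ' :: description.toList)
  let metrics : PySem.Dict String Int :=
    ((((PySem.Dict.empty.insert "strength_rating" 50).insert "durability_rating" 50).insert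
        "cost_efficiency" 50).insert "environmental_impact" 50).insert "processing_ease" 50
  let metrics := if ["strong", "tensile", "compressive"].any (fun w => PySem.Chars.isIn w.toList text)
    then metrics.modify "strength_rating" 0 (· + 20) else metrics
  let metrics := if ["durable", "corrosion", "weather"].any (fun w => PySem.Chars.isIn w.toList text)
    then metrics.modify "durability_rating" 0 (· + 20) else metrics
  let metrics := if ["cheap", "inexpensive", "cost-effective"].any (fun w => PySem.Chars.isIn w.toList text)
    then metrics.modify "cost_efficiency" 0 (· + 20) else metrics
  let metrics := if ["eco-friendly", "sustainable", "green"].any (fun w => PySem.Chars.isIn w.toList text)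
    then metrics.modify "environmental_impact" 0 (· + 20) else metrics
  let metrics := if ["easy", "simple", "machinable"].any (fun w => PySem.Chars.isIn w.toList text)
    then metrics.modify "processing_ease" 0 (· + 20) else metrics
  let metrics := metrics.keys.foldl (fun d k => d.insert k (max 0 (min 100 (d.getD k 0)))) metrics
  metrics.items

-- ===== PORT B =====
def pvKeywordKeys : List (List Char × String) :=
  [("strong".toList, "strength_rating"), ("tensile".toList, "strength_rating"),
   ("compressive".toList, "strength_rating"),
   ("durable".toList, "durability_rating"), ("corrosion".toList, "durability_rating"),
   ("weather".toList, "durability_rating"),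
   ("cheap".toList, "cost_efficiency"), ("inexpensive".toList, "cost_efficiency"),
   ("cost-effective".toList, "cost_efficiency"),
   ("eco-friendly".toList, "environmental_impact"), ("sustainable".toList, "environmental_impact"),
   ("green".toList, "environmental_impact"),
   ("easy".toList, "processing_ease"), ("simple".toList, "processing_ease"),
   ("machinable".toList, "processing_ease")]

def pvMetricKeys : List String :=
  ["strength_rating", "durability_rating", "cost_efficiency", "environmental_impact", "processing_ease"]

-- _scan_hits: for i in range(len(text)): for (kw, key) in table: if text.startswith(kw, i): hits.add(key)
def pvScanHits (text : List Char) : PySem.Set String :=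
  (PySem.List.pyRange 0 (text.length : Int) 1).foldl
    (fun h i => pvKeywordKeys.foldl
      (fun h p => if PySem.Chars.startswith (text.drop i.toNat) p.1 then PySem.Set.add h p.2 else h) h)
    PySem.Set.empty

def generate_performance_metrics_py_alt (material_name : String) (description : String) : List (String × Int) :=
  let text := PySem.Chars.lower (material_name.toList ++ ' ' :: description.toList)
  let hits := pvScanHits text
  pvMetricKeys.map (fun k => (k, if k ∈ hits then (70 : Int) else 50))

-- ===== PRECONDITION & SPEC =====
def Spec_generate_performance_metrics_py (material_name : String) (description : String) (out : List (String × Int)) : Prop := out = generate_performance_metrics_py_alt material_name description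
instance (material_name : String) (description : String) (out : List (String × Int)) : Decidable (Spec_generate_performance_metrics_py material_name description out) := by unfold Spec_generate_performance_metrics_py; infer_instance

-- ===== CLAIM (what is proved, stated in full; the proofs are below) =====
def Claim_equal_generate_performance_metrics_py : Prop := ∀ (material_name : String) (description : String), Dom_generate_performance_metrics_py material_name description → Spec_generate_performance_metrics_py material_name description (generate_performance_metrics_py material_name description)

-- ===== LEMMAS AND PROOFS =====

-- membership after the inner fold over the keyword table
theorem pv_mem_inner (C : List Char × String → Bool) (kws : List (List Char × String))
    (h : PySem.Set String) (k : String) :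
    (k ∈ kws.foldl (fun h p => if C p then PySem.Set.add h p.2 else h) h) ↔
      k ∈ h ∨ ∃ p ∈ kws, C p ∧ p.2 = k := by
  induction kws generalizing h with
  | nil => simp
  | cons q qs ih =>
    simp only [List.foldl_cons, ih, List.mem_cons]
    by_cases hq : C q
    · simp only [hq, if_pos, PySem.Set.mem_add]
      constructor
      · rintro (⟨hk | he⟩ | ⟨p, hp, hc, he⟩)
        · exact Or.inl hk
        · exact Or.inr ⟨q, Or.inl rfl, hq, he.symm⟩
        · exact Or.inr ⟨p, Or.inr hp, hc, he⟩
      · rintro (hk | ⟨p, hp | hp, hc, he⟩)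
        · exact Or.inl (Or.inl hk)
        · exact Or.inl (Or.inr (by rw [hp] at he; exact he.symm))
        · exact Or.inr ⟨p, hp, hc, he⟩
    · simp only [hq, if_neg, Bool.false_eq_true, not_false_iff]
      constructor
      · rintro (hk | ⟨p, hp, hc, he⟩)
        · exact Or.inl hk
        · exact Or.inr ⟨p, Or.inr hp, hc, he⟩
      · rintro (hk | ⟨p, hp | hp, hc, he⟩)
        · exact Or.inl hk
        · exact absurd hc (by rw [hp]; simp [hq])
        · exact Or.inr ⟨p, hp, hc, he⟩

-- membership after the outer fold over the positions
theorem pv_mem_outer (text : List Char) (L : List Int) (h : PySem.Set String) (k : String) :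
    (k ∈ L.foldl
        (fun h i => pvKeywordKeys.foldl
          (fun h p => if PySem.Chars.startswith (text.drop i.toNat) p.1 then PySem.Set.add h p.2 else h) h)
        h) ↔
      k ∈ h ∨ ∃ i ∈ L, ∃ p ∈ pvKeywordKeys, PySem.Chars.startswith (text.drop i.toNat) p.1 ∧ p.2 = k := by
  induction L generalizing h with
  | nil => simp
  | cons i is ih =>
    simp only [List.foldl_cons, ih, List.mem_cons]
    rw [pv_mem_inner (fun p => PySem.Chars.startswith (text.drop i.toNat) p.1)]
    constructor
    · rintro (⟨hk | ⟨p, hp, hc, he⟩⟩ | ⟨j, hj, p, hp, hc, he⟩)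
      · exact Or.inl hk
      · exact Or.inr ⟨i, Or.inl rfl, p, hp, hc, he⟩
      · exact Or.inr ⟨j, Or.inr hj, p, hp, hc, he⟩
    · rintro (hk | ⟨j, hj | hj, p, hp, hc, he⟩)
      · exact Or.inl (Or.inl hk)
      · exact Or.inl (Or.inr ⟨p, hp, by rw [← hj]; exact hc, he⟩)
      · exact Or.inr ⟨j, hj, p, hp, hc, he⟩

-- the positions sweep finds a nonempty keyword iff Python's 'kw in text'
theorem pv_sweep_iff (text kw : List Char) (hkw : kw ≠ []) :
    (∃ i ∈ PySem.List.pyRange 0 (text.length : Int) 1, kw <+: text.drop i.toNat) ↔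
      PySem.Chars.isIn kw text = true := by
  rw [← PySem.Chars.exists_prefix_drop_iff_isIn]
  constructor
  · rintro ⟨i, _, hp⟩; exact ⟨i.toNat, hp⟩
  · rintro ⟨j, hp⟩
    by_cases hj : j < text.length
    · refine ⟨(j : Int), ?_, by simpa using hp⟩
      rw [PySem.List.mem_pyRange_one]
      exact ⟨Int.natCast_nonneg j, by exact_mod_cast hj⟩
    · exfalso
      rw [List.drop_eq_nil_of_le (by omega)] at hp
      exact hkw (List.prefix_nil.mp hp)

-- hit-set membership of key k ↔ some table keyword of k occurs in the text
theorem pv_scanHits_iff (text : List Char) (k : String) :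
    k ∈ pvScanHits text ↔ ∃ p ∈ pvKeywordKeys, p.2 = k ∧ PySem.Chars.isIn p.1 text = true := by
  rw [pvScanHits, pv_mem_outer]
  have hne : ∀ p ∈ pvKeywordKeys, p.1 ≠ [] := by decide
  constructor
  · rintro (hk | ⟨i, hi, p, hp, hc, he⟩)
    · simp [PySem.Set.empty] at hk
    · refine ⟨p, hp, he, ?_⟩
      rw [← PySem.Chars.exists_prefix_drop_iff_isIn]
      exact ⟨i.toNat, (PySem.Chars.startswith_iff _ _).mp hc⟩
  · rintro ⟨p, hp, he, hin⟩
    obtain ⟨i, hi, hpre⟩ := (pv_sweep_iff text p.1 (hne p hp)).mpr hin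
    exact Or.inr ⟨i, hi, p, hp, (PySem.Chars.startswith_iff _ _).mpr hpre, he⟩

-- port A's whole dict pipeline as a function of the five keyword-hit booleans
theorem pv_key_A (b1 b2 b3 b4 b5 : Bool) :
    (let metrics : PySem.Dict String Int :=
      ((((PySem.Dict.empty.insert "strength_rating" 50).insert "durability_rating" 50).insert
          "cost_efficiency" 50).insert "environmental_impact" 50).insert "processing_ease" 50
     let metrics := if b1 then metrics.modify "strength_rating" 0 (· + 20) else metrics
     let metrics := if b2 then metrics.modify "durability_rating" 0 (· + 20) else metrics
     let metrics := if b3 then metrics.modify "cost_efficiency" 0 (· + 20) else metrics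
     let metrics := if b4 then metrics.modify "environmental_impact" 0 (· + 20) else metrics
     let metrics := if b5 then metrics.modify "processing_ease" 0 (· + 20) else metrics
     let metrics := metrics.keys.foldl (fun d k => d.insert k (max 0 (min 100 (d.getD k 0)))) metrics
     metrics.items) =
    [("strength_rating", if b1 then (70 : Int) else 50),
     ("durability_rating", if b2 then (70 : Int) else 50),
     ("cost_efficiency", if b3 then (70 : Int) else 50),
     ("environmental_impact", if b4 then (70 : Int) else 50),
     ("processing_ease", if b5 then (70 : Int) else 50)] := by
  cases b1 <;> cases b2 <;> cases b3 <;> cases b4 <;> cases b5 <;> rfl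

-- per-key: the hit set answers exactly A's 'any(keyword in text)' test
theorem pv_hit1 (text : List Char) :
    ("strength_rating" ∈ pvScanHits text) ↔
      (["strong", "tensile", "compressive"].any (fun w => PySem.Chars.isIn w.toList text) = true) := by
  rw [pv_scanHits_iff]; simp [pvKeywordKeys]
theorem pv_hit2 (text : List Char) :
    ("durability_rating" ∈ pvScanHits text) ↔
      (["durable", "corrosion", "weather"].any (fun w => PySem.Chars.isIn w.toList text) = true) := by
  rw [pv_scanHits_iff]; simp [pvKeywordKeys]
theorem pv_hit3 (text : List Char) :
    ("cost_efficiency" ∈ pvScanHits text) ↔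
      (["cheap", "inexpensive", "cost-effective"].any (fun w => PySem.Chars.isIn w.toList text) = true) := by
  rw [pv_scanHits_iff]; simp [pvKeywordKeys]
theorem pv_hit4 (text : List Char) :
    ("environmental_impact" ∈ pvScanHits text) ↔
      (["eco-friendly", "sustainable", "green"].any (fun w => PySem.Chars.isIn w.toList text) = true) := by
  rw [pv_scanHits_iff]; simp [pvKeywordKeys]
theorem pv_hit5 (text : List Char) :
    ("processing_ease" ∈ pvScanHits text) ↔
      (["easy", "simple", "machinable"].any (fun w => PySem.Chars.isIn w.toList text) = true) := by
  rw [pv_scanHits_iff]; simp [pvKeywordKeys]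

-- ===== VERDICT (by name: the statement is the Claim_ definition above) =====
theorem generate_performance_metrics_py_spec : Claim_equal_generate_performance_metrics_py := by
  intro material_name description _
  unfold Spec_generate_performance_metrics_py generate_performance_metrics_py
    generate_performance_metrics_py_alt
  rw [pv_key_A]
  simp only [pvMetricKeys, List.map, pv_hit1, pv_hit2, pv_hit3, pv_hit4, pv_hit5]
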